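-- pv_equiv track=rewrite | github.com/GreenSheep-Studio/PythonLearning | src/n = int(input()).py | YesIs
-- ===== SOURCE A (Python) =====
-- def YesIs(NumStr, n):
--     # 定义计数器
--     Count = 0
--     # 将字符串末尾补0
--     NumStr = NumStr + '0'
--     # 遍历字符串
--     for i in range(len(NumStr)):
--         # 如果字符串中为1，计数器加1
--         if NumStr[i] == "1":
--             Count += 1
--             # 如果计数器大于等于n，且计数器大于等于3，返回Yes
--             if Count >= n and Count >= 3:
--                 return "Yes"
--         # 如果字符串中为0，计数器重置为0
--         else:
--             Count = 0
--     # 如果遍历完字符串仍未返回Yes，返回No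
--     return "No"
-- ===== SOURCE B (Python) =====
-- def YesIs(NumStr, n):
--     t = max(n, 3)
--     return "Yes" if t <= len(NumStr) and "1" * t in NumStr else "No"
-- ===== Notes on version B (the rewrite author's own statement) =====
-- stated objective: faster
-- what changed: Replaces the character-by-character counter loop with early return by computing the threshold max(n,3) once and testing whether '1'*threshold occurs as a substring of NumStr with the built-in 'in'.
import Mathlib
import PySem

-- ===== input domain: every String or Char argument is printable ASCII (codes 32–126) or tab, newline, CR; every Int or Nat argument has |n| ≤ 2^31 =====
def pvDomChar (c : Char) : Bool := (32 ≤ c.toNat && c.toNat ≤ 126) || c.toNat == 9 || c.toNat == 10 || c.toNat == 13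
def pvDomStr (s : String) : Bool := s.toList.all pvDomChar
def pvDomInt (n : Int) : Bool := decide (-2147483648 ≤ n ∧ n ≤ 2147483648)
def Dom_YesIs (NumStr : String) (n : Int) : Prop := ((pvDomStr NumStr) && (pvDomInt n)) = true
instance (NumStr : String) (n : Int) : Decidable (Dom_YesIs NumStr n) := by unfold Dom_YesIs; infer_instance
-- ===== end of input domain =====

-- B replaces A's counter loop with early return by a single substring test: "Yes" iff '1'*max(n,3) occurs in NumStr (alternative decomposition).

-- ===== PORT A =====
-- the for-loop over the characters of NumStr + '0' with the running counter and early return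
def YesIsLoop (cs : List Char) (count : Int) (n : Int) : String :=
  match cs with
  | [] => "No"
  | c :: rest =>
    if c = '1' then
      if count + 1 ≥ n ∧ count + 1 ≥ 3 then "Yes"
      else YesIsLoop rest (count + 1) n
    else YesIsLoop rest 0 n

def YesIs (NumStr : String) (n : Int) : String :=
  YesIsLoop (NumStr.toList ++ ['0']) 0 n

-- ===== PORT B =====
-- t = max(n, 3); "Yes" if t <= len(NumStr) and "1" * t in NumStr else "No"
def YesIs_alt (NumStr : String) (n : Int) : String :=
  if max n 3 ≤ PySem.Str.len NumStr ∧
     PySem.Chars.isIn (PySem.List.pyRepeat ['1'] (max n 3)) NumStr.toList = true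
  then "Yes" else "No"

-- ===== PRECONDITION & SPEC =====
def Spec_YesIs (NumStr : String) (n : Int) (out : String) : Prop := out = YesIs_alt NumStr n
instance (NumStr : String) (n : Int) (out : String) : Decidable (Spec_YesIs NumStr n out) := by unfold Spec_YesIs; infer_instance

-- ===== CLAIM (what is proved, stated in full; the proofs are below) =====
def Claim_equal_YesIs : Prop := ∀ (NumStr : String) (n : Int), Dom_YesIs NumStr n → Spec_YesIs NumStr n (YesIs NumStr n)

-- ===== LEMMAS AND PROOFS =====

-- length of the leading run of '1's
def lead (cs : List Char) : Nat := (cs.takeWhile (· == '1')).length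

theorem lead_cons_one (rest : List Char) : lead ('1' :: rest) = 1 + lead rest := by
  simp [lead]; omega

theorem lead_cons_ne (c : Char) (rest : List Char) (h : ¬ c = '1') : lead (c :: rest) = 0 := by
  simp [lead, h]

theorem lead_le_length (cs : List Char) : lead cs ≤ cs.length :=
  (List.takeWhile_sublist _).length_le

theorem replicate_one_ne_nil (T : Nat) (h : T ≠ 0) : List.replicate T '1' ≠ [] := by
  simp [List.replicate_eq_nil_iff]; omega

-- replicate k '1' is a prefix of l iff the leading run of '1's has length ≥ k
theorem replicate_prefix_iff (l : List Char) : ∀ k : Nat, List.replicate k '1' <+: l ↔ k ≤ lead l := by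
  induction l with
  | nil =>
    intro k
    constructor
    · intro h
      have h0 := List.prefix_nil.mp h
      have : k = 0 := by
        by_contra hk
        exact replicate_one_ne_nil k hk h0
      simp [this]
    · intro h
      have : k = 0 := by simp [lead] at h; omega
      simp [this]
  | cons x xs ih =>
    intro k
    cases k with
    | zero => simp
    | succ m =>
      rw [List.replicate_succ, List.cons_prefix_cons]
      by_cases hx : x = '1'
      · subst hx
        rw [lead_cons_one]
        constructor
        · rintro ⟨_, hp⟩; have := (ih m).mp hp; omega
        · intro h; exact ⟨rfl, (ih m).mpr (by omega)⟩
      · rw [lead_cons_ne x xs hx]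
        constructor
        · rintro ⟨h, _⟩; exact absurd h.symm hx
        · omega

-- the main loop invariant: the loop says "Yes" iff the carried run can be completed
-- to length T, or a fresh run of length T occurs later
theorem loop_characterization (n : Int) (T : Nat) (hT : T = (max n 3).toNat) (hT3 : 3 ≤ T) :
    ∀ (cs : List Char) (c : Nat),
      YesIsLoop cs (c : Int) n =
        if (1 ≤ lead cs ∧ T ≤ c + lead cs) ∨ List.replicate T '1' <:+: cs then "Yes" else "No" := by
  intro cs
  induction cs with
  | nil =>
    intro c
    have h1 : ¬ (List.replicate T '1' <:+: ([] : List Char)) := by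
      rw [List.infix_nil]
      exact replicate_one_ne_nil T (by omega)
    simp [YesIsLoop, lead, h1]
  | cons x rest ih =>
    intro c
    by_cases hx : x = '1'
    · subst hx
      rw [lead_cons_one]
      have hinf : List.replicate T '1' <:+: ('1' :: rest) ↔
          List.replicate T '1' <+: ('1' :: rest) ∨ List.replicate T '1' <:+: rest :=
        List.infix_cons_iff
      have hpre : List.replicate T '1' <+: ('1' :: rest) ↔ T ≤ 1 + lead rest := by
        rw [replicate_prefix_iff, lead_cons_one]
      by_cases htest : (c : Int) + 1 ≥ n ∧ (c : Int) + 1 ≥ 3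
      · have hc1 : T ≤ c + 1 := by
          rcases htest with ⟨h1, h2⟩; omega
        have : YesIsLoop ('1' :: rest) (c : Int) n = "Yes" := by
          simp [YesIsLoop, htest]
        rw [this, if_pos (Or.inl ⟨by omega, by omega⟩)]
      · have hc1 : ¬ (T ≤ c + 1) := by
          rcases not_and_or.mp htest with h | h <;> omega
        have hstep : YesIsLoop ('1' :: rest) (c : Int) n = YesIsLoop rest ((c : Int) + 1) n := by
          simp [YesIsLoop, htest]
        rw [hstep, show ((c : Int) + 1) = (((c + 1 : Nat)) : Int) by push_cast; ring, ih (c + 1)]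
        congr 1
        rw [hinf, hpre]
        apply propext
        constructor
        · rintro (⟨h1, h2⟩ | h)
          · exact Or.inl ⟨by omega, by omega⟩
          · exact Or.inr (Or.inr h)
        · rintro (⟨h1, h2⟩ | h | h)
          · exact Or.inl ⟨by omega, by omega⟩
          · exact Or.inl ⟨by omega, by omega⟩
          · exact Or.inr h
    · rw [lead_cons_ne x rest hx]
      have hstep : YesIsLoop (x :: rest) (c : Int) n = YesIsLoop rest (((0 : Nat) : Int)) n := by
        simp [YesIsLoop, hx]
      rw [hstep, ih 0]
      congr 1
      have hinf : List.replicate T '1' <:+: (x :: rest) ↔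
          List.replicate T '1' <+: (x :: rest) ∨ List.replicate T '1' <:+: rest :=
        List.infix_cons_iff
      have hpre : ¬ (List.replicate T '1' <+: (x :: rest)) := by
        intro h
        rw [replicate_prefix_iff, lead_cons_ne x rest hx] at h
        omega
      apply propext
      constructor
      · rintro (⟨h1, h2⟩ | h)
        · exact Or.inr (hinf.mpr (Or.inr ((replicate_prefix_iff rest T).mpr (by omega)).isInfix))
        · exact Or.inr (hinf.mpr (Or.inr h))
      · rintro (⟨h1, _⟩ | h)
        · omega
        · rcases hinf.mp h with h1 | h1
          · exact absurd h1 hpre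
          · exact Or.inr h1

-- appending the trailing '0' does not change the loop's answer
theorem loop_append_zero (n : Int) : ∀ (cs : List Char) (c : Int),
    YesIsLoop (cs ++ ['0']) c n = YesIsLoop cs c n := by
  intro cs
  induction cs with
  | nil =>
    intro c
    simp [YesIsLoop]
  | cons x rest ih =>
    intro c
    by_cases hx : x = '1'
    · subst hx
      by_cases htest : c + 1 ≥ n ∧ c + 1 ≥ 3 <;> simp [YesIsLoop, htest, ih]
    · simp [YesIsLoop, hx, ih]

-- ===== VERDICT (by name: the statement is the Claim_ definition above) =====
theorem YesIs_spec : Claim_equal_YesIs := by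
  intro NumStr n _
  unfold Spec_YesIs
  have ht3 : (3 : Int) ≤ max n 3 := le_max_right n 3
  set T : Nat := (max n 3).toNat with hTdef
  have hT3 : 3 ≤ T := by omega
  have htT : max n 3 = (T : Int) := by omega
  set cs : List Char := NumStr.toList with hcs
  have hA : YesIs NumStr n =
      if (1 ≤ lead cs ∧ T ≤ 0 + lead cs) ∨ List.replicate T '1' <:+: cs then "Yes" else "No" := by
    unfold YesIs
    rw [loop_append_zero, show (0 : Int) = ((0 : Nat) : Int) from rfl,
        loop_characterization n T hTdef hT3]
  have hB : YesIs_alt NumStr n =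
      if max n 3 ≤ PySem.Str.len NumStr ∧
         PySem.Chars.isIn (List.replicate T '1') cs = true then "Yes" else "No" := by
    unfold YesIs_alt
    rw [PySem.List.pyRepeat_singleton, ← hTdef]
  have hlen : PySem.Str.len NumStr = (cs.length : Int) := by
    simp [PySem.Str.len_eq, hcs]
  rw [hA, hB]
  apply if_congr ?_ rfl rfl
  rw [PySem.Chars.isIn_iff_infix, hlen]
  constructor
  · rintro (⟨h1, h2⟩ | h)
    · have hp := (replicate_prefix_iff cs T).mpr (by omega)
      have hl := lead_le_length cs
      exact ⟨by omega, hp.isInfix⟩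
    · have hl := h.length_le
      rw [List.length_replicate] at hl
      exact ⟨by omega, h⟩
  · rintro ⟨_, h⟩
    exact Or.inr h
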